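-- pv_equiv track=rewrite | github.com/Chenalejandro/solidcode | apps/website/src/server/db/seeds/maxima-duracion-de-canciones-en-cd/solution-dynamicProgramming.py | aux
-- ===== SOURCE A (Python) =====
-- def aux(matrix, duraciones, capacidadRestante, indice):
--     if indice == 0:
--         return 0
--     indiceReal = indice - 1
--     if matrix[indice][capacidadRestante] is None:
--         if duraciones[indiceReal] > capacidadRestante:
--             matrix[indice][capacidadRestante] = aux(
--                 matrix, duraciones, capacidadRestante, indice - 1
--             )
--         else:
--             matrix[indice][capacidadRestante] = max(
--                 aux(
--                     matrix,
--                     duraciones,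
--                     capacidadRestante - duraciones[indiceReal],
--                     indice - 1,
--                 )
--                 + duraciones[indiceReal],
--                 aux(matrix, duraciones, capacidadRestante, indice - 1),
--             )
--     return matrix[indice][capacidadRestante]
-- ===== SOURCE B (Python) =====
-- def aux(matrix, duraciones, capacidadRestante, indice):
--     # Bottom-up DP over one rolling row, honoring any pre-filled memo cells.
--     if indice == 0:
--         return 0
--     row = [0] * (capacidadRestante + 1)
--     for i in range(1, indice + 1):
--         d = duraciones[i - 1]
--         mrow = matrix[i]
--         nxt = []
--         for c in range(capacidadRestante + 1):
--             m = mrow[c]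
--             if m is not None:
--                 nxt.append(m)
--             elif d > c:
--                 nxt.append(row[c])
--             else:
--                 nxt.append(max(row[c - d] + d, row[c]))
--         row = nxt
--     return row[capacidadRestante]
-- ===== Notes on version B (the rewrite author's own statement) =====
-- stated objective: alternative
-- what changed: Replaces top-down memoized recursion that mutates the memo matrix with an iterative bottom-up DP over a rolling row (honoring any pre-filled memo cells), eliminating recursion entirely.
-- outside the precondition, e.g. on aux([[None], [None]], [-1], 0, 1): A returns 0, B raises IndexError; on aux([[None], [None]], [5], -1, 1): A returns 0, B raises IndexError
import Mathlib
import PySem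

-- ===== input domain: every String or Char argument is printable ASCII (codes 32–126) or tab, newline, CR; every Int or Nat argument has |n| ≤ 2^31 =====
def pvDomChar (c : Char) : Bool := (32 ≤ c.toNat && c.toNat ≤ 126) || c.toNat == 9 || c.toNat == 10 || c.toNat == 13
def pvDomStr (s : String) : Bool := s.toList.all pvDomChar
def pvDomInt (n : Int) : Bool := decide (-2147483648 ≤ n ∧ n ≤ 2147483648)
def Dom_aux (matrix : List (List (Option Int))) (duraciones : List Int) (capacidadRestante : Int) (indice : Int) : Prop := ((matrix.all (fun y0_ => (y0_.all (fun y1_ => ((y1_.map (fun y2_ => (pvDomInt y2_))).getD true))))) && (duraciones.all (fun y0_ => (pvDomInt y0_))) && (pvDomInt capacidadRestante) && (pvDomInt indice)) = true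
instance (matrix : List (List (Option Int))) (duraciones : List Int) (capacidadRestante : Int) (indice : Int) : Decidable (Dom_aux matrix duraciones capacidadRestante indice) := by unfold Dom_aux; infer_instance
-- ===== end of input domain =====

-- B replaces A's memo-mutating top-down recursion with an iterative bottom-up DP over a
-- rolling row (honoring pre-filled memo cells); equivalence is about the RETURN value only —
-- A fills memo cells of the passed matrix in place, B does not mutate it.

-- ===== PORT A =====
-- matrix[i][j] (two Python subscripts; none = IndexError)
def pyGet2? (m : List (List (Option Int))) (i j : Int) : Option (Option Int) :=
  (PySem.List.pyGet? m i).bind fun row => PySem.List.pyGet? row j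

-- matrix[i][j] = v (in A this assignment only runs after the same cell was read successfully,
-- so the in-range total form pySetD is exact here)
def pySet2 (m : List (List (Option Int))) (i j : Int) (v : Option Int) : List (List (Option Int)) :=
  match PySem.List.pyGet? m i with
  | none => m
  | some row => PySem.List.pySetD m i (PySem.List.pySetD row j v)

-- A's recursion, threading the mutated matrix; none = an exception; fuel bounds the
-- recursion depth (Python's own recursion is bounded by an IndexError once indice
-- walks below -len(matrix)), it is never exhausted on inputs where Python returns.
def auxA : Nat → List (List (Option Int)) → List Int → Int → Int →
    Option (Int × List (List (Option Int)))
  | 0, _, _, _, _ => none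
  | fuel + 1, matrix, duraciones, capacidadRestante, indice =>
    if indice = 0 then some (0, matrix)
    else
      let indiceReal := indice - 1
      match pyGet2? matrix indice capacidadRestante with
      | none => none
      | some (some v) => some (v, matrix)  -- cell not None: fall through to the final return
      | some none =>
        match PySem.List.pyGet? duraciones indiceReal with
        | none => none
        | some d =>
          if d > capacidadRestante then
            match auxA fuel matrix duraciones capacidadRestante (indice - 1) with
            | none => none
            | some (v, m1) =>
              let m2 := pySet2 m1 indice capacidadRestante (some v)
              (pyGet2? m2 indice capacidadRestante).bind fun cell => cell.map (·, m2)
          else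
            match auxA fuel matrix duraciones (capacidadRestante - d) (indice - 1) with
            | none => none
            | some (v1, m1) =>
              match auxA fuel m1 duraciones capacidadRestante (indice - 1) with
              | none => none
              | some (v2, m2) =>
                let m3 := pySet2 m2 indice capacidadRestante (some (max (v1 + d) v2))
                (pyGet2? m3 indice capacidadRestante).bind fun cell => cell.map (·, m3)

def aux (matrix : List (List (Option Int))) (duraciones : List Int) (capacidadRestante : Int) (indice : Int) : Int :=
  ((auxA (indice.toNat + matrix.length + 1) matrix duraciones capacidadRestante indice).map Prod.fst).getD 0

-- ===== PORT B =====
-- one cell of the new row: prefer a pre-filled memo cell, else the knapsack recurrence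
def bCell (mrow : List (Option Int)) (row : List Int) (d c : Int) : Option Int :=
  match PySem.List.pyGet? mrow c with
  | none => none
  | some (some v) => some v
  | some none =>
    if d > c then PySem.List.pyGet? row c
    else (PySem.List.pyGet? row (c - d)).bind fun a =>
         (PySem.List.pyGet? row c).map fun b => max (a + d) b

-- the outer 'for i in range(1, indice+1)' loop, rolling row → nxt
def bRows (matrix : List (List (Option Int))) (duraciones : List Int) (capacidadRestante : Int) :
    List Int → List Int → Option (List Int)
  | row, [] => some row
  | row, i :: rest =>
    (PySem.List.pyGet? duraciones (i - 1)).bind fun d =>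
    (PySem.List.pyGet? matrix i).bind fun mrow =>
    ((PySem.List.pyRange 0 (capacidadRestante + 1) 1).mapM (bCell mrow row d)).bind fun nxt =>
    bRows matrix duraciones capacidadRestante nxt rest

def aux_alt (matrix : List (List (Option Int))) (duraciones : List Int) (capacidadRestante : Int) (indice : Int) : Int :=
  if indice = 0 then 0
  else
    ((bRows matrix duraciones capacidadRestante
        (List.replicate (capacidadRestante + 1).toNat 0)
        (PySem.List.pyRange 1 (indice + 1) 1)).bind
      fun row => PySem.List.pyGet? row capacidadRestante).getD 0

-- ===== PRECONDITION & SPEC =====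
-- Pre_ restricts to well-formed memo-knapsack calls: 0 ≤ indice, the memo matrix has a row for
-- every used index, rows are wider than the capacity, enough nonnegative durations, and the
-- capacity is nonnegative. Outside it A raises, or returns only via Python negative-index
-- wraparound / short rows reached with negative durations — artifacts of A's indexing on which
-- B's bottom-up table (columns 0..capacidadRestante only) naturally raises.
def Pre_aux (matrix : List (List (Option Int))) (duraciones : List Int) (capacidadRestante : Int) (indice : Int) : Prop :=
  indice = 0 ∨
  (1 ≤ indice ∧ indice < (matrix.length : Int) ∧ indice ≤ (duraciones.length : Int) ∧
   0 ≤ capacidadRestante ∧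
   (∀ i ∈ List.range (indice.toNat + 1), 1 ≤ i → capacidadRestante < ((matrix.getD i []).length : Int)) ∧
   (∀ d ∈ duraciones.take indice.toNat, 0 ≤ d))
instance (matrix : List (List (Option Int))) (duraciones : List Int) (capacidadRestante : Int) (indice : Int) : Decidable (Pre_aux matrix duraciones capacidadRestante indice) := by unfold Pre_aux; infer_instance

def pvWitness_aux : List (List (Option Int)) × List Int × Int × Int := ([[none], [none]], [1], 0, 1)

def Spec_aux (matrix : List (List (Option Int))) (duraciones : List Int) (capacidadRestante : Int) (indice : Int) (out : Int) : Prop := out = aux_alt matrix duraciones capacidadRestante indice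
instance (matrix : List (List (Option Int))) (duraciones : List Int) (capacidadRestante : Int) (indice : Int) (out : Int) : Decidable (Spec_aux matrix duraciones capacidadRestante indice out) := by unfold Spec_aux; infer_instance

-- ===== CLAIM (what is proved, stated in full; the proofs are below) =====
def Claim_equal_aux : Prop := ∀ (matrix : List (List (Option Int))) (duraciones : List Int) (capacidadRestante : Int) (indice : Int), Dom_aux matrix duraciones capacidadRestante indice → Pre_aux matrix duraciones capacidadRestante indice → Spec_aux matrix duraciones capacidadRestante indice (aux matrix duraciones capacidadRestante indice)

-- ===== LEMMAS AND PROOFS =====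

-- the common value: memo-honoring knapsack recurrence over the ORIGINAL matrix
def fknap (W : List (List (Option Int))) (dur : List Int) : Nat → Int → Int
  | 0, _ => 0
  | i + 1, c =>
    match (W.getD (i + 1) []).getD c.toNat none with
    | some v => v
    | none =>
      let d := dur.getD i 0
      if d > c then fknap W dur i c
      else max (fknap W dur i (c - d) + d) (fknap W dur i c)

-- a matrix state M is consistent with the original W: same shape, and every cell either
-- still holds W's value or was a None cell of W now memoized with its fknap value
def Cons (W : List (List (Option Int))) (dur : List Int) (M : List (List (Option Int))) : Prop :=
  M.length = W.length ∧
  ∀ i j : Nat, (M.getD i []).length = (W.getD i []).length ∧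
    ((M.getD i []).getD j none = (W.getD i []).getD j none ∨
     ((W.getD i []).getD j none = none ∧
      (M.getD i []).getD j none = some (fknap W dur i (j : Int))))

theorem cons_refl (W : List (List (Option Int))) (dur : List Int) : Cons W dur W :=
  ⟨rfl, fun _ _ => ⟨rfl, Or.inl rfl⟩⟩

theorem fknap_succ (W : List (List (Option Int))) (dur : List Int) (i : Nat) (c : Int) :
    fknap W dur (i + 1) c =
      match (W.getD (i + 1) []).getD c.toNat none with
      | some v => v
      | none =>
        if dur.getD i 0 > c then fknap W dur i c
        else max (fknap W dur i (c - dur.getD i 0) + dur.getD i 0) (fknap W dur i c) := rfl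

theorem getD_set_self {α : Type} [Inhabited α] (M : List α) (i : Nat) (r : α) (hi : i < M.length) :
    (M.set i r).getD i default = r := by
  rw [List.getD_eq_getElem?_getD, List.getElem?_set]
  simp [hi]

theorem getD_set_ne {α : Type} [Inhabited α] (M : List α) (i i' : Nat) (r : α) (h : i ≠ i') :
    (M.set i r).getD i' default = M.getD i' default := by
  rw [List.getD_eq_getElem?_getD, List.getElem?_set, if_neg h, ← List.getD_eq_getElem?_getD]

theorem pySet2_spec (M : List (List (Option Int))) (i : Nat) (c : Int) (v : Option Int)
    (hi : i < M.length) (hc0 : 0 ≤ c) :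
    pySet2 M (i : Int) c v = M.set i ((M.getD i []).set c.toNat v) := by
  unfold pySet2
  rw [PySem.List.pyGet?_natCast, List.getElem?_eq_getElem hi]
  show PySem.List.pySetD M (i : Int) (PySem.List.pySetD M[i] c v) = _
  rw [PySem.List.pySetD_natCast, PySem.List.pySetD_of_nonneg _ v hc0,
    List.getD_eq_getElem _ _ hi]

theorem cons_set (W : List (List (Option Int))) (dur : List Int) (M : List (List (Option Int)))
    (i c : Nat) (hM : Cons W dur M) (hi : i < W.length) (hc : c < (W.getD i []).length)
    (hw : (W.getD i []).getD c none = none) :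
    Cons W dur (M.set i ((M.getD i []).set c (some (fknap W dur i (c : Int))))) := by
  obtain ⟨hlen, hcell⟩ := hM
  have hiM : i < M.length := by omega
  have hrlen : (M.getD i []).length = (W.getD i []).length := (hcell i 0).1
  refine ⟨by simpa using hlen, fun i' j' => ?_⟩
  by_cases hii : i = i'
  · subst hii
    rw [show ([] : List (Option Int)) = (default : List (Option Int)) from rfl,
      getD_set_self M i _ hiM]
    refine ⟨by simpa using hrlen, ?_⟩
    by_cases hjc : c = j'
    · subst hjc
      right
      refine ⟨hw, ?_⟩
      rw [List.getD_eq_getElem?_getD, List.getElem?_set, if_pos rfl,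
        if_pos (show c < (M.getD i default).length from (by omega : c < (M.getD i []).length))]
      rfl
    · rw [List.getD_eq_getElem?_getD, List.getElem?_set, if_neg hjc,
        ← List.getD_eq_getElem?_getD]
      exact (hcell i j').2
  · rw [show ([] : List (Option Int)) = (default : List (Option Int)) from rfl,
      getD_set_ne M i i' _ hii]
    exact hcell i' j'

theorem auxA_spec (W : List (List (Option Int))) (dur : List Int) (C : Int)
    (hC : 0 ≤ C)
    (k : Nat) (fuel : Nat) (M : List (List (Option Int))) (c : Int)
    (hfuel : k + 1 ≤ fuel)
    (hM : Cons W dur M)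
    (hkW : k < W.length) (hkd : k ≤ dur.length)
    (hrow : ∀ i : Nat, 1 ≤ i → i ≤ k → C < ((W.getD i []).length : Int))
    (hd : ∀ j : Nat, j < k → 0 ≤ dur.getD j 0)
    (hc0 : 0 ≤ c) (hcC : c ≤ C) :
    ∃ M', auxA fuel M dur c (k : Int) = some (fknap W dur k c, M') ∧ Cons W dur M' := by
  induction k generalizing fuel M c with
  | zero =>
    match fuel, hfuel with
    | f + 1, _ =>
      exact ⟨M, by simp [auxA, fknap], hM⟩
  | succ s ih =>
    match fuel, hfuel with
    | f + 1, hfuel =>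
    obtain ⟨hlen, hcell⟩ := hM
    have hk0 : ¬ (((s + 1 : Nat) : Int) = 0) := by omega
    have hiM : s + 1 < M.length := by omega
    have hrlenM : (M.getD (s + 1) []).length = (W.getD (s + 1) []).length := (hcell (s + 1) 0).1
    have hWrl : C < ((W.getD (s + 1) []).length : Int) := hrow (s + 1) (by omega) (by omega)
    have hct : (c.toNat : Int) = c := Int.toNat_of_nonneg hc0
    have hcM : c.toNat < (M.getD (s + 1) []).length := by omega
    have hcW : c.toNat < (W.getD (s + 1) []).length := by omega
    have hsd : s < dur.length := by omega
    have hdget : dur.getD s 0 = dur[s] := List.getD_eq_getElem _ _ hsd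
    have hread : pyGet2? M ((s + 1 : Nat) : Int) c
        = some ((M.getD (s + 1) []).getD c.toNat none) := by
      unfold pyGet2?
      rw [PySem.List.pyGet?_natCast, List.getElem?_eq_getElem hiM]
      show PySem.List.pyGet? M[s + 1] c = _
      rw [show M[s + 1] = M.getD (s + 1) [] from (List.getD_eq_getElem _ _ hiM).symm,
        PySem.List.pyGet?_of_nonneg _ hc0, List.getElem?_eq_getElem hcM,
        List.getD_eq_getElem _ _ hcM]
    have hcast : ((s + 1 : Nat) : Int) - 1 = ((s : Nat) : Int) := by push_cast; ring
    have hdurg : PySem.List.pyGet? dur ((s : Nat) : Int) = some dur[s] := by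
      rw [PySem.List.pyGet?_natCast, List.getElem?_eq_getElem hsd]
    rcases hq : (M.getD (s + 1) []).getD c.toNat none with _ | v
    case some =>
      -- memo cell already filled: A returns it directly
      refine ⟨M, ?_, ⟨hlen, hcell⟩⟩
      rw [auxA.eq_2]
      simp only [if_neg hk0, hread, hq]
      have hv : v = fknap W dur (s + 1) c := by
        rcases (hcell (s + 1) c.toNat).2 with heq | ⟨hwn, hms⟩
        · rw [hq] at heq
          rw [fknap_succ, ← heq]
        · rw [hq] at hms
          have hv' : v = fknap W dur (s + 1) ((c.toNat : Nat) : Int) := Option.some.inj hms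
          rw [hv', hct]
      rw [hv]
    case none =>
      have hwq : (W.getD (s + 1) []).getD c.toNat none = none := by
        rcases (hcell (s + 1) c.toNat).2 with heq | ⟨hwn, hms⟩
        · rw [hq] at heq; exact heq.symm
        · rw [hq] at hms; exact absurd hms (by simp)
      have hfk : fknap W dur (s + 1) c =
          if dur[s] > c then fknap W dur s c
          else max (fknap W dur s (c - dur[s]) + dur[s]) (fknap W dur s c) := by
        rw [fknap_succ, hwq, hdget]
      have ihf : s + 1 ≤ f := by omega
      have hrow' : ∀ i : Nat, 1 ≤ i → i ≤ s → C < ((W.getD i []).length : Int) :=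
        fun i h1 h2 => hrow i h1 (by omega)
      have hd' : ∀ j : Nat, j < s → 0 ≤ dur.getD j 0 := fun j hj => hd j (by omega)
      have hds : 0 ≤ dur[s] := hdget ▸ hd s (by omega)
      rw [auxA.eq_2]
      simp only [if_neg hk0, hread, hq, hcast, hdurg]
      by_cases hdc : dur[s] > c
      · rw [if_pos hdc]
        obtain ⟨M1, hrun, hM1⟩ := ih f M c ihf ⟨hlen, hcell⟩ (by omega) (by omega) hrow' hd' hc0 hcC
        simp only [hrun]
        have hlenM1 : M1.length = W.length := hM1.1
        have hrlenM1 : (M1.getD (s + 1) []).length = (W.getD (s + 1) []).length :=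
          (hM1.2 (s + 1) 0).1
        have hval2 : fknap W dur s c = fknap W dur (s + 1) ((c.toNat : Nat) : Int) := by
          rw [hct, hfk, if_pos hdc]
        rw [pySet2_spec M1 (s + 1) c _ (by omega) hc0]
        have hcons2 := cons_set W dur M1 (s + 1) c.toNat hM1 hkW hcW hwq
        rw [hval2] at *
        refine ⟨_, ?_, hcons2⟩
        unfold pyGet2?
        rw [PySem.List.pyGet?_natCast, List.getElem?_set, if_pos rfl, if_pos (by omega)]
        show (PySem.List.pyGet? ((M1.getD (s + 1) []).set c.toNat _) c).bind _ = _
        rw [PySem.List.pyGet?_of_nonneg _ hc0, List.getElem?_set, if_pos rfl,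
          if_pos (by omega), hct]
        rfl
      · rw [if_neg hdc]
        rw [not_lt] at hdc
        obtain ⟨M1, hrun1, hM1⟩ := ih f M (c - dur[s]) ihf ⟨hlen, hcell⟩ (by omega) (by omega)
          hrow' hd' (by omega) (by omega)
        simp only [hrun1]
        obtain ⟨M2, hrun2, hM2⟩ := ih f M1 c ihf hM1 (by omega) (by omega) hrow' hd' hc0 hcC
        simp only [hrun2]
        have hlenM2 : M2.length = W.length := hM2.1
        have hrlenM2 : (M2.getD (s + 1) []).length = (W.getD (s + 1) []).length :=
          (hM2.2 (s + 1) 0).1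
        have hval2 : max (fknap W dur s (c - dur[s]) + dur[s]) (fknap W dur s c)
            = fknap W dur (s + 1) ((c.toNat : Nat) : Int) := by
          rw [hct, hfk, if_neg (by omega)]
        rw [pySet2_spec M2 (s + 1) c _ (by omega) hc0]
        have hcons2 := cons_set W dur M2 (s + 1) c.toNat hM2 hkW hcW hwq
        rw [hval2] at *
        refine ⟨_, ?_, hcons2⟩
        unfold pyGet2?
        rw [PySem.List.pyGet?_natCast, List.getElem?_set, if_pos rfl, if_pos (by omega)]
        show (PySem.List.pyGet? ((M2.getD (s + 1) []).set c.toNat _) c).bind _ = _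
        rw [PySem.List.pyGet?_of_nonneg _ hc0, List.getElem?_set, if_pos rfl,
          if_pos (by omega), hct]
        rfl

theorem mapM_some {α β : Type} (f : α → Option β) (g : α → β) :
    ∀ l : List α, (∀ x ∈ l, f x = some (g x)) → l.mapM f = some (l.map g) := by
  intro l h
  induction l with
  | nil => rfl
  | cons x xs ih =>
    simp only [List.mapM_cons, h x (by simp), List.map_cons, Option.bind_eq_bind]
    rw [ih (fun y hy => h y (by simp [hy]))]
    rfl

theorem bCell_spec (W : List (List (Option Int))) (dur : List Int) (C : Int)
    (k : Nat) (c : Int) (hc0 : 0 ≤ c) (hcC : c ≤ C)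
    (hd0 : 0 ≤ dur.getD k 0)
    (hrw : C < ((W.getD (k + 1) []).length : Int)) :
    bCell (W.getD (k + 1) []) ((List.range (C.toNat + 1)).map (fun c' : Nat => fknap W dur k (c' : Int)))
        (dur.getD k 0) c = some (fknap W dur (k + 1) c) := by
  have hct : (c.toNat : Int) = c := Int.toNat_of_nonneg hc0
  have hcl : c.toNat < (W.getD (k + 1) []).length := by omega
  have hrow : ∀ e : Int, 0 ≤ e → e ≤ C →
      PySem.List.pyGet? ((List.range (C.toNat + 1)).map (fun c' : Nat => fknap W dur k (c' : Int))) e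
        = some (fknap W dur k e) := by
    intro e he0 heC
    rw [PySem.List.pyGet?_of_nonneg _ he0]
    have het : (e.toNat : Int) = e := Int.toNat_of_nonneg he0
    have hel : e.toNat < C.toNat + 1 := by omega
    rw [List.getElem?_map, List.getElem?_range hel]
    simp [het]
  unfold bCell
  rw [PySem.List.pyGet?_of_nonneg _ hc0, List.getElem?_eq_getElem hcl]
  have hm : (W.getD (k + 1) [])[c.toNat] = (W.getD (k + 1) []).getD c.toNat none :=
    (List.getD_eq_getElem _ _ hcl).symm
  rw [hm]
  have hfk : fknap W dur (k + 1) c =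
      match (W.getD (k + 1) []).getD c.toNat none with
      | some v => v
      | none =>
        if dur.getD k 0 > c then fknap W dur k c
        else max (fknap W dur k (c - dur.getD k 0) + dur.getD k 0) (fknap W dur k c) := rfl
  rw [hfk]
  cases h : (W.getD (k + 1) []).getD c.toNat none with
  | some v => rfl
  | none =>
    by_cases hdc : dur.getD k 0 > c
    · simp only [if_pos hdc]
      exact hrow c hc0 hcC
    · simp only [if_neg hdc]
      rw [not_lt] at hdc
      rw [hrow (c - dur.getD k 0) (by omega) (by omega), hrow c hc0 hcC]
      rfl

theorem bRows_spec (W : List (List (Option Int))) (dur : List Int) (C : Int) (hC : 0 ≤ C)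
    (N : Nat) (hNW : N < W.length) (hNd : N ≤ dur.length)
    (hrow : ∀ i : Nat, 1 ≤ i → i ≤ N → C < ((W.getD i []).length : Int))
    (hd : ∀ j : Nat, j < N → 0 ≤ dur.getD j 0)
    (m k : Nat) (hkm : k + m = N) :
    bRows W dur C ((List.range (C.toNat + 1)).map (fun c : Nat => fknap W dur k (c : Int)))
        (PySem.List.pyRange ((k : Int) + 1) ((N : Int) + 1) 1)
      = some ((List.range (C.toNat + 1)).map (fun c : Nat => fknap W dur N (c : Int))) := by
  induction m generalizing k with
  | zero =>
    have hk : k = N := by omega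
    subst hk
    have he : PySem.List.pyRange ((k : Int) + 1) ((k : Int) + 1) 1 = [] := by
      simp [PySem.List.pyRange]
    rw [he]
    rfl
  | succ m ih =>
    have hkN : k < N := by omega
    rw [PySem.List.pyRange_one_cons (by omega : (k : Int) + 1 < (N : Int) + 1)]
    show (PySem.List.pyGet? dur ((k : Int) + 1 - 1)).bind _ = _
    rw [show ((k : Int) + 1 - 1) = ((k : Nat) : Int) by ring]
    rw [PySem.List.pyGet?_natCast, List.getElem?_eq_getElem (show k < dur.length by omega)]
    simp only [Option.bind_some]
    rw [show ((k : Int) + 1) = ((k + 1 : Nat) : Int) by push_cast; ring]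
    rw [PySem.List.pyGet?_natCast, List.getElem?_eq_getElem (show k + 1 < W.length by omega)]
    simp only [Option.bind_some]
    rw [show C + 1 = ((C.toNat + 1 : Nat) : Int) by omega]
    rw [PySem.List.pyRange_zero_natCast]
    rw [mapM_some _ (fun x : Int => fknap W dur (k + 1) x) _ ?_]
    · simp only [Option.bind_some, List.map_map]
      have hcomp : ((fun x : Int => fknap W dur (k + 1) x) ∘ fun j : Nat => (j : Int))
            = (fun c : Nat => fknap W dur (k + 1) (c : Int)) := rfl
      rw [hcomp]
      exact ih (k + 1) (by omega)
    · intro x hx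
      simp only [List.mem_map, List.mem_range] at hx
      obtain ⟨j, hj, rfl⟩ := hx
      have hW : W[k + 1] = W.getD (k + 1) [] := (List.getD_eq_getElem _ _ (by omega)).symm
      have hdur : dur[k] = dur.getD k 0 := (List.getD_eq_getElem _ _ (by omega)).symm
      rw [hW, hdur]
      exact bCell_spec W dur C k (j : Int) (by omega) (by omega)
        (hd k (by omega)) (hrow (k + 1) (by omega) (by omega))

-- ===== VERDICT (by name: the statement is the Claim_ definition above) =====
theorem aux_spec : Claim_equal_aux := by
  intro matrix dur C ind _hdom hpre
  unfold Spec_aux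
  rcases hpre with h0 | ⟨h1, hW, hdl, hC, hrowm, hdur⟩
  · subst h0
    unfold aux aux_alt
    rw [auxA.eq_2]
    norm_num
  · have hC0 : (0 : Int) ≤ C := hC
    have hkind : ((ind.toNat : Nat) : Int) = ind := Int.toNat_of_nonneg (by omega)
    have hrow' : ∀ i : Nat, 1 ≤ i → i ≤ ind.toNat → C < ((matrix.getD i []).length : Int) := by
      intro i hi1 hik
      exact hrowm i (List.mem_range.mpr (by omega)) hi1
    have hd' : ∀ j : Nat, j < ind.toNat → 0 ≤ dur.getD j 0 := by
      intro j hj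
      have hjl : j < dur.length := by omega
      rw [List.getD_eq_getElem _ _ hjl]
      have hjt : j < (dur.take ind.toNat).length := by simp; omega
      have hmem : dur[j] ∈ dur.take ind.toNat := by
        have he : (dur.take ind.toNat)[j]'hjt = dur[j] := List.getElem_take
        exact he ▸ List.getElem_mem hjt
      exact hdur _ hmem
    obtain ⟨M', hrun, _⟩ := auxA_spec matrix dur C hC0 ind.toNat
      (ind.toNat + matrix.length + 1) matrix C (by omega) (cons_refl matrix dur)
      (by omega) (by omega) hrow' hd' hC0 le_rfl
    have hA : aux matrix dur C ind = fknap matrix dur ind.toNat C := by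
      unfold aux
      rw [hkind] at hrun
      rw [hrun]
      rfl
    have hB : aux_alt matrix dur C ind = fknap matrix dur ind.toNat C := by
      unfold aux_alt
      rw [if_neg (by omega : ¬ ind = 0)]
      have hrep : List.replicate ((C + 1).toNat) (0 : Int)
          = (List.range (C.toNat + 1)).map (fun c : Nat => fknap matrix dur 0 (c : Int)) := by
        rw [show (C + 1).toNat = C.toNat + 1 by omega]
        rw [show (fun c : Nat => fknap matrix dur 0 (c : Int)) = (fun _ : Nat => (0 : Int))
          from funext fun c => rfl]
        rw [List.map_const', List.length_range]
      have h1 := bRows_spec matrix dur C hC0 ind.toNat (by omega) (by omega) hrow' hd'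
        ind.toNat 0 (by omega)
      rw [show (((0 : Nat) : Int) + 1) = (1 : Int) by norm_num, hkind] at h1
      rw [hrep, h1]
      show (PySem.List.pyGet? ((List.range (C.toNat + 1)).map
        (fun c : Nat => fknap matrix dur ind.toNat (c : Int))) C).getD 0 = _
      rw [PySem.List.pyGet?_of_nonneg _ hC0, List.getElem?_map,
        List.getElem?_range (by omega : C.toNat < C.toNat + 1)]
      show (some (fknap matrix dur ind.toNat ((C.toNat : Nat) : Int))).getD 0 = _
      rw [Int.toNat_of_nonneg hC0]
      rfl
    rw [hA, hB]
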